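-- pv_equiv track=rewrite | github.com/taehee-kim-dev/Problem-solving | 2020 Coupang Tech Campus Recruiting Coding Test/3.py | solution
-- ===== SOURCE A (Python) =====
-- from collections import defaultdict
--
-- def solution(k, score):
--
--     count_score_differences = defaultdict(int)
--     score_differences_scores_set = defaultdict(set)
--
--     manipulated_score_rank = set()
--     not_manipulated_score_rank = set()
--
--     for i in range(0, (len(score) - 1) - 1 + 1):
--         count_score_differences[score[i] - score[i + 1]] += 1
--         score_differences_scores_set[score[i] - score[i + 1]] |= {i + 1, i + 2}
--
--     for difference, count in count_score_differences.items():
--         if count >= k: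
--             manipulated_score_rank |= score_differences_scores_set[difference]
--         else:
--             not_manipulated_score_rank |= score_differences_scores_set[difference]
--
--     return len(not_manipulated_score_rank - manipulated_score_rank)
-- ===== SOURCE B (Python) =====
-- def solution(k, score):
--     n = len(score)
--     counts = {}
--     for i in range(n - 1):
--         d = score[i] - score[i + 1]
--         counts[d] = counts.get(d, 0) + 1
--     total = 0
--     for r in range(1, n + 1):
--         pairs = [i for i in (r - 2, r - 1) if 0 <= i < n - 1]
--         if pairs and all(counts[score[i] - score[i + 1]] < k for i in pairs):
--             total += 1
--     return total
-- ===== Notes on version B (the rewrite author's own statement) =====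
-- stated objective: simpler
-- what changed: B drops A's per-difference rank-set dictionary and the two accumulated rank sets with a final set difference, and instead counts directly, per rank, whether the rank has an adjacent pair and every adjacent pair's score difference occurs fewer than k times.
import Mathlib
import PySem

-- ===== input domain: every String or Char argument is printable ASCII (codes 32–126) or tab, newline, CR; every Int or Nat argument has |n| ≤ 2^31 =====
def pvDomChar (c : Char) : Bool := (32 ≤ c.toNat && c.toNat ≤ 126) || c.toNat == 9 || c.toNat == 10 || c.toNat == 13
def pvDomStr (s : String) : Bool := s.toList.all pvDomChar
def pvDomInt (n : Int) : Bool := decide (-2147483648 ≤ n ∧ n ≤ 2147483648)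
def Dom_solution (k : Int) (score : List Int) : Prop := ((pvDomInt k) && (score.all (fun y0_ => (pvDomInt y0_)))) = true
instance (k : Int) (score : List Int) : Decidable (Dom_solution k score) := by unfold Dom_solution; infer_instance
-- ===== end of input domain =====

-- B replaces A's per-difference rank-set dictionary and the two accumulated sets by a direct
-- per-rank count: a rank is kept iff it has an adjacent pair and all its adjacent pairs have a
-- difference occurring fewer than k times (objective: simpler).

-- ===== PORT A =====
-- one pass building count-per-difference and rank-set-per-difference, then a pass over the
-- distinct differences splitting ranks into manipulated / not-manipulated sets
def solution (k : Int) (score : List Int) : Int :=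
  let st := (PySem.List.pyRange 0 (((score.length : Int) - 1) - 1 + 1) 1).foldl
    (fun (st : PySem.Dict Int Int × PySem.Dict Int (List Int)) i =>
      (st.1.modify (PySem.List.pyGetD score i 0 - PySem.List.pyGetD score (i + 1) 0) 0 (· + 1),
       st.2.modify (PySem.List.pyGetD score i 0 - PySem.List.pyGetD score (i + 1) 0) []
         (fun s => PySem.Set.union s [i + 1, i + 2])))
    (PySem.Dict.empty, PySem.Dict.empty)
  let ms := st.1.items.foldl
    (fun (ms : PySem.Set Int × PySem.Set Int) p =>
      if k ≤ p.2 then (PySem.Set.union ms.1 (st.2.getD p.1 []), ms.2)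
      else (ms.1, PySem.Set.union ms.2 (st.2.getD p.1 [])))
    (PySem.Set.empty, PySem.Set.empty)
  ((PySem.Set.diff ms.2 ms.1).length : Int)

-- ===== PORT B =====
-- counts per difference, then a per-rank scan: count ranks whose adjacent pairs all have a
-- difference occurring fewer than k times
def solution_alt (k : Int) (score : List Int) : Int :=
  let n : Int := score.length
  let counts := (PySem.List.pyRange 0 (n - 1) 1).foldl
    (fun (d : PySem.Dict Int Int) i =>
      d.insert (PySem.List.pyGetD score i 0 - PySem.List.pyGetD score (i + 1) 0)
        (d.getD (PySem.List.pyGetD score i 0 - PySem.List.pyGetD score (i + 1) 0) 0 + 1))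
    PySem.Dict.empty
  (PySem.List.pyRange 1 (n + 1) 1).foldl
    (fun (total : Int) r =>
      let pairs := [r - 2, r - 1].filter (fun i => decide (0 ≤ i ∧ i < n - 1))
      if pairs ≠ [] ∧ pairs.all (fun i =>
          decide (counts.getD (PySem.List.pyGetD score i 0 - PySem.List.pyGetD score (i + 1) 0) 0 < k))
      then total + 1 else total) 0

-- ===== PRECONDITION & SPEC =====
def Spec_solution (k : Int) (score : List Int) (out : Int) : Prop := out = solution_alt k score
instance (k : Int) (score : List Int) (out : Int) : Decidable (Spec_solution k score out) := by unfold Spec_solution; infer_instance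

-- ===== CLAIM (what is proved, stated in full; the proofs are below) =====
def Claim_equal_solution : Prop := ∀ (k : Int) (score : List Int), Dom_solution k score → Spec_solution k score (solution k score)

-- ===== LEMMAS AND PROOFS =====

-- membership in the per-key set dictionary built by repeated 'g[key(x)] |= val(x)'
lemma pv_mem_getD_foldl_modify_union {α : Type} (key : α → Int) (val : α → List Int)
    (l : List α) (g : PySem.Dict Int (List Int)) (c r : Int) :
    (r ∈ (l.foldl (fun g x => g.modify (key x) [] (fun s => PySem.Set.union s (val x))) g).getD c []) ↔
      (r ∈ g.getD c [] ∨ ∃ x ∈ l, key x = c ∧ r ∈ val x) := by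
  induction l generalizing g with
  | nil => simp
  | cons x t ih =>
    simp only [List.foldl_cons, ih, List.mem_cons]
    rw [PySem.Dict.getD_modify]
    split_ifs with h
    · rw [PySem.Set.mem_union]
      subst h
      constructor
      · rintro ((hg | hv) | ⟨x', hx', hk, hv'⟩)
        · exact Or.inl hg
        · exact Or.inr ⟨x, Or.inl rfl, rfl, hv⟩
        · exact Or.inr ⟨x', Or.inr hx', hk, hv'⟩
      · rintro (hg | ⟨x', (rfl | hx'), hk, hv'⟩)
        · exact Or.inl (Or.inl hg)
        · exact Or.inl (Or.inr hv')
        · exact Or.inr ⟨x', hx', hk, hv'⟩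
    · constructor
      · rintro (hg | ⟨x', hx', hk, hv'⟩)
        · exact Or.inl hg
        · exact Or.inr ⟨x', Or.inr hx', hk, hv'⟩
      · rintro (hg | ⟨x', (rfl | hx'), hk, hv'⟩)
        · exact Or.inl hg
        · exact absurd hk.symm h
        · exact Or.inr ⟨x', hx', hk, hv'⟩

-- membership in a conditional set-union accumulation
lemma pv_mem_foldl_union_if {α : Type} (p : α → Prop) [DecidablePred p] (val : α → List Int)
    (l : List α) (s : PySem.Set Int) (r : Int) :
    (r ∈ l.foldl (fun s x => if p x then PySem.Set.union s (val x) else s) s) ↔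
      (r ∈ s ∨ ∃ x ∈ l, p x ∧ r ∈ val x) := by
  induction l generalizing s with
  | nil => simp
  | cons x t ih =>
    simp only [List.foldl_cons, ih, List.mem_cons]
    split_ifs with h
    · rw [PySem.Set.mem_union]
      constructor
      · rintro ((hs | hv) | ⟨x', hx', hp, hv'⟩)
        · exact Or.inl hs
        · exact Or.inr ⟨x, Or.inl rfl, h, hv⟩
        · exact Or.inr ⟨x', Or.inr hx', hp, hv'⟩
      · rintro (hs | ⟨x', (rfl | hx'), hp, hv'⟩)
        · exact Or.inl (Or.inl hs)
        · exact Or.inl (Or.inr hv')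
        · exact Or.inr ⟨x', hx', hp, hv'⟩
    · constructor
      · rintro (hs | ⟨x', hx', hp, hv'⟩)
        · exact Or.inl hs
        · exact Or.inr ⟨x', Or.inr hx', hp, hv'⟩
      · rintro (hs | ⟨x', (rfl | hx'), hp, hv'⟩)
        · exact Or.inl hs
        · exact absurd hp h
        · exact Or.inr ⟨x', hx', hp, hv'⟩

lemma pv_mem_foldl_union_if_not {α : Type} (p : α → Prop) [DecidablePred p] (val : α → List Int)
    (l : List α) (s : PySem.Set Int) (r : Int) :
    (r ∈ l.foldl (fun s x => if p x then s else PySem.Set.union s (val x)) s) ↔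
      (r ∈ s ∨ ∃ x ∈ l, ¬ p x ∧ r ∈ val x) := by
  induction l generalizing s with
  | nil => simp
  | cons x t ih =>
    simp only [List.foldl_cons, ih, List.mem_cons]
    split_ifs with h
    · constructor
      · rintro (hs | ⟨x', hx', hp, hv'⟩)
        · exact Or.inl hs
        · exact Or.inr ⟨x', Or.inr hx', hp, hv'⟩
      · rintro (hs | ⟨x', (rfl | hx'), hp, hv'⟩)
        · exact Or.inl hs
        · exact absurd h hp
        · exact Or.inr ⟨x', hx', hp, hv'⟩
    · rw [PySem.Set.mem_union]
      constructor
      · rintro ((hs | hv) | ⟨x', hx', hp, hv'⟩)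
        · exact Or.inl hs
        · exact Or.inr ⟨x, Or.inl rfl, h, hv⟩
        · exact Or.inr ⟨x', Or.inr hx', hp, hv'⟩
      · rintro (hs | ⟨x', (rfl | hx'), hp, hv'⟩)
        · exact Or.inl (Or.inl hs)
        · exact Or.inl (Or.inr hv')
        · exact Or.inr ⟨x', hx', hp, hv'⟩

lemma pv_nodup_foldl_union_if {α : Type} (p : α → Prop) [DecidablePred p] (val : α → List Int)
    (l : List α) (s : PySem.Set Int) (hs : s.Nodup) :
    (l.foldl (fun s x => if p x then s else PySem.Set.union s (val x)) s).Nodup := by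
  induction l generalizing s with
  | nil => exact hs
  | cons x t ih =>
    rw [List.foldl_cons]
    refine ih _ ?_
    split_ifs with h
    · exact hs
    · exact PySem.Set.nodup_union _ _ hs

lemma pv_nodup_pyRange_one (a b : Int) : (PySem.List.pyRange a b).Nodup := by
  rw [PySem.List.pyRange_of_pos a b (by norm_num)]
  refine List.Nodup.map ?_ (List.nodup_range)
  intro x y hxy
  simp only at hxy
  omega

-- the pure-logic core: a rank is "kept" iff it has an adjacent pair and all its adjacent
-- pairs are light
lemma pv_core (n r : Int) (L : Int → Prop) :
    ((∃ i, (0 ≤ i ∧ i < n - 1) ∧ (L i ∧ (r = i + 1 ∨ r = i + 2))) ∧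
      ¬(∃ i, (0 ≤ i ∧ i < n - 1) ∧ (¬ L i ∧ (r = i + 1 ∨ r = i + 2)))) ↔
    ((1 ≤ r ∧ r < n + 1) ∧
      ((∃ i, (i = r - 2 ∨ i = r - 1) ∧ (0 ≤ i ∧ i < n - 1)) ∧
       (∀ i, ((i = r - 2 ∨ i = r - 1) ∧ (0 ≤ i ∧ i < n - 1)) → L i))) := by
  constructor
  · rintro ⟨⟨i, hi, hLi, hr⟩, hno⟩
    refine ⟨by omega, ⟨i, by omega, hi⟩, ?_⟩
    rintro j ⟨hj, hj2⟩
    by_contra hLj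
    exact hno ⟨j, hj2, hLj, by omega⟩
  · rintro ⟨hr, ⟨i, hi, hib⟩, hall⟩
    refine ⟨⟨i, hib, hall i ⟨hi, hib⟩, by omega⟩, ?_⟩
    rintro ⟨j, hjb, hLj, hrj⟩
    exact hLj (hall j ⟨by omega, hjb⟩)

theorem pv_main (k : Int) (score : List Int) : solution k score = solution_alt k score := by
  unfold solution solution_alt
  dsimp only
  have hb : ((score.length : Int) - 1) - 1 + 1 = (score.length : Int) - 1 := by ring
  rw [hb]
  rw [PySem.List.foldl_prod_mk
        (f := fun (d : PySem.Dict Int Int) i =>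
          d.modify (PySem.List.pyGetD score i 0 - PySem.List.pyGetD score (i + 1) 0) 0 (· + 1))
        (g := fun (g : PySem.Dict Int (List Int)) i =>
          g.modify (PySem.List.pyGetD score i 0 - PySem.List.pyGetD score (i + 1) 0) []
            (fun s => PySem.Set.union s [i + 1, i + 2]))]
  dsimp only
  rw [show (List.foldl (fun (d : PySem.Dict Int Int) i =>
          d.modify (PySem.List.pyGetD score i 0 - PySem.List.pyGetD score (i + 1) 0) 0 (· + 1))
          PySem.Dict.empty (PySem.List.pyRange 0 ((score.length : Int) - 1) 1))
      = PySem.Dict.counter ((PySem.List.pyRange 0 ((score.length : Int) - 1) 1).map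
          (fun i => PySem.List.pyGetD score i 0 - PySem.List.pyGetD score (i + 1) 0)) from by
        rw [PySem.Dict.counter_eq_foldl, List.foldl_map]]
  rw [PySem.Dict.items_counter]
  set n : Int := (score.length : Int) with hn
  set G : PySem.Dict Int (List Int) := List.foldl (fun (g : PySem.Dict Int (List Int)) i =>
          g.modify (PySem.List.pyGetD score i 0 - PySem.List.pyGetD score (i + 1) 0) []
            (fun s => PySem.Set.union s [i + 1, i + 2])) PySem.Dict.empty
          (PySem.List.pyRange 0 (n - 1) 1) with hG
  set D : List Int := (PySem.List.pyRange 0 (n - 1) 1).map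
          (fun i => PySem.List.pyGetD score i 0 - PySem.List.pyGetD score (i + 1) 0) with hD
  have hsplit : (fun (ms : PySem.Set Int × PySem.Set Int) (p : Int × Int) =>
      if k ≤ p.2 then (PySem.Set.union ms.1 (G.getD p.1 []), ms.2)
      else (ms.1, PySem.Set.union ms.2 (G.getD p.1 [])))
    = (fun (ms : PySem.Set Int × PySem.Set Int) (p : Int × Int) =>
      (if k ≤ p.2 then PySem.Set.union ms.1 (G.getD p.1 []) else ms.1,
       if k ≤ p.2 then ms.2 else PySem.Set.union ms.2 (G.getD p.1 []))) := by
    funext ms p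
    split_ifs <;> rfl
  rw [hsplit, PySem.List.foldl_prod_mk
        (f := fun (s : PySem.Set Int) (p : Int × Int) => if k ≤ p.2 then PySem.Set.union s (G.getD p.1 []) else s)
        (g := fun (s : PySem.Set Int) (p : Int × Int) => if k ≤ p.2 then s else PySem.Set.union s (G.getD p.1 []))]
  dsimp only
  rw [List.foldl_map (f := fun d => (d, (D.count d : Int)))]
  rw [List.foldl_map (f := fun d => (d, (D.count d : Int)))]
  dsimp only
  have hlight : ∀ v : Int, (List.foldl (fun (d : PySem.Dict Int Int) i =>
      d.insert (PySem.List.pyGetD score i 0 - PySem.List.pyGetD score (i + 1) 0)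
        (d.getD (PySem.List.pyGetD score i 0 - PySem.List.pyGetD score (i + 1) 0) 0 + 1))
      PySem.Dict.empty (PySem.List.pyRange 0 (n - 1) 1)).getD v 0 = (D.count v : Int) := by
    intro v
    rw [show (List.foldl (fun (d : PySem.Dict Int Int) i =>
        d.insert (PySem.List.pyGetD score i 0 - PySem.List.pyGetD score (i + 1) 0)
          (d.getD (PySem.List.pyGetD score i 0 - PySem.List.pyGetD score (i + 1) 0) 0 + 1))
        PySem.Dict.empty (PySem.List.pyRange 0 (n - 1) 1))
      = List.foldl (fun (d : PySem.Dict Int Int) x => d.insert x (d.getD x 0 + 1)) PySem.Dict.empty D from by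
        rw [hD, List.foldl_map]]
    rw [PySem.Dict.getD_foldl_insert_add_one]
    simp [PySem.Dict.getD_empty]
  simp only [hlight]
  rw [PySem.List.foldl_ite_add_one (p := fun r =>
      List.filter (fun i => decide (0 ≤ i ∧ i < n - 1)) [r - 2, r - 1] ≠ [] ∧
      ((List.filter (fun i => decide (0 ≤ i ∧ i < n - 1)) [r - 2, r - 1]).all fun i =>
          decide ((D.count (PySem.List.pyGetD score i 0 - PySem.List.pyGetD score (i + 1) 0) : Int) < k)) = true)]
  rw [zero_add]
  have hnodN : (List.foldl (fun (x : PySem.Set Int) y => if k ≤ (List.count y D : Int) then x else x.union (G.getD y [])) PySem.Set.empty (PySem.Set.ofList D)).Nodup :=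
    pv_nodup_foldl_union_if (p := fun d => k ≤ (List.count d D : Int)) (val := fun d => G.getD d []) _ _ List.nodup_nil
  have hnodS := PySem.Set.nodup_diff _ (List.foldl (fun (x : PySem.Set Int) y => if k ≤ (List.count y D : Int) then x.union (G.getD y []) else x) PySem.Set.empty (PySem.Set.ofList D)) hnodN
  have hnodF : ((PySem.List.pyRange 1 (n + 1)).filter (fun x =>
      decide (List.filter (fun i => decide (0 ≤ i ∧ i < n - 1)) [x - 2, x - 1] ≠ [] ∧
        ((List.filter (fun i => decide (0 ≤ i ∧ i < n - 1)) [x - 2, x - 1]).all fun i =>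
          decide ((List.count (PySem.List.pyGetD score i 0 - PySem.List.pyGetD score (i + 1) 0) D : Int) < k)) = true))).Nodup :=
    (pv_nodup_pyRange_one 1 (n + 1)).filter _
  have hmem : ∀ r : Int, (r ∈ (List.foldl (fun (x : PySem.Set Int) y => if k ≤ (List.count y D : Int) then x else x.union (G.getD y [])) PySem.Set.empty (PySem.Set.ofList D)).diff
        (List.foldl (fun (x : PySem.Set Int) y => if k ≤ (List.count y D : Int) then x.union (G.getD y []) else x) PySem.Set.empty (PySem.Set.ofList D))) ↔
      (r ∈ (PySem.List.pyRange 1 (n + 1)).filter (fun x =>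
        decide (List.filter (fun i => decide (0 ≤ i ∧ i < n - 1)) [x - 2, x - 1] ≠ [] ∧
          ((List.filter (fun i => decide (0 ≤ i ∧ i < n - 1)) [x - 2, x - 1]).all fun i =>
            decide ((List.count (PySem.List.pyGetD score i 0 - PySem.List.pyGetD score (i + 1) 0) D : Int) < k)) = true))) := by
    intro r
    have hGmem : ∀ c r' : Int, r' ∈ G.getD c [] ↔
        ∃ i ∈ PySem.List.pyRange 0 (n - 1) 1,
          (PySem.List.pyGetD score i 0 - PySem.List.pyGetD score (i + 1) 0) = c ∧ (r' = i + 1 ∨ r' = i + 2) := by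
      intro c r'
      rw [hG, pv_mem_getD_foldl_modify_union]
      simp [PySem.Dict.getD_empty]
    rw [PySem.Set.mem_diff,
        pv_mem_foldl_union_if_not (p := fun d => k ≤ (List.count d D : Int)) (val := fun d => G.getD d []),
        pv_mem_foldl_union_if (p := fun d => k ≤ (List.count d D : Int)) (val := fun d => G.getD d []),
        List.mem_filter, decide_eq_true_iff]
    simp only [hGmem, PySem.Set.mem_ofList, PySem.Set.empty, List.not_mem_nil, false_or,
      List.all_eq_true, List.mem_filter, List.mem_cons, or_false, decide_eq_true_iff,
      PySem.List.mem_pyRange_one, not_le]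
    have hcol1 : (∃ x ∈ D, (List.count x D : Int) < k ∧ ∃ i, (0 ≤ i ∧ i < n - 1) ∧
          PySem.List.pyGetD score i 0 - PySem.List.pyGetD score (i + 1) 0 = x ∧ (r = i + 1 ∨ r = i + 2)) ↔
        (∃ i, (0 ≤ i ∧ i < n - 1) ∧
          (((List.count (PySem.List.pyGetD score i 0 - PySem.List.pyGetD score (i + 1) 0) D : Int) < k) ∧
            (r = i + 1 ∨ r = i + 2))) := by
      constructor
      · rintro ⟨x, -, hc, i, hib, rfl, hr⟩; exact ⟨i, hib, hc, hr⟩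
      · rintro ⟨i, hib, hc, hr⟩
        exact ⟨_, by rw [hD]; exact List.mem_map.2 ⟨i, PySem.List.mem_pyRange_one.2 hib, rfl⟩,
          hc, i, hib, rfl, hr⟩
    have hcol2 : (∃ x ∈ D, k ≤ (List.count x D : Int) ∧ ∃ i, (0 ≤ i ∧ i < n - 1) ∧
          PySem.List.pyGetD score i 0 - PySem.List.pyGetD score (i + 1) 0 = x ∧ (r = i + 1 ∨ r = i + 2)) ↔
        (∃ i, (0 ≤ i ∧ i < n - 1) ∧
          (¬ ((List.count (PySem.List.pyGetD score i 0 - PySem.List.pyGetD score (i + 1) 0) D : Int) < k) ∧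
            (r = i + 1 ∨ r = i + 2))) := by
      constructor
      · rintro ⟨x, -, hc, i, hib, rfl, hr⟩; exact ⟨i, hib, not_lt.2 hc, hr⟩
      · rintro ⟨i, hib, hc, hr⟩
        exact ⟨_, by rw [hD]; exact List.mem_map.2 ⟨i, PySem.List.mem_pyRange_one.2 hib, rfl⟩,
          not_lt.1 hc, i, hib, rfl, hr⟩
    have hne : (List.filter (fun i => decide (0 ≤ i ∧ i < n - 1)) [r - 2, r - 1] ≠ []) ↔
        (∃ i, (i = r - 2 ∨ i = r - 1) ∧ (0 ≤ i ∧ i < n - 1)) := by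
      rw [Ne, List.filter_eq_nil_iff]
      push Not
      simp only [List.mem_cons, List.not_mem_nil, or_false, decide_eq_true_iff]
    rw [hcol1, hcol2, hne]
    exact pv_core n r _
  rw [List.countP_eq_length_filter]
  exact_mod_cast (((List.perm_ext_iff_of_nodup hnodS hnodF).2 hmem).length_eq)

-- ===== VERDICT (by name: the statement is the Claim_ definition above) =====
theorem solution_spec : Claim_equal_solution := by
  intro k score _
  unfold Spec_solution
  exact pv_main k score
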